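-- pv_equiv track=rewrite | github.com/MrBrantCode/unitest_baseline | mut_generate/mist_train_taco/taco_5120/solution.py | count_a_visits
-- ===== SOURCE A (Python) =====
-- def count_a_visits(S: str) -> int:
--     cur = 'A'
--     ans = 0
--     for char in S:
--         if char == cur:
--             ans += 1
--         else:
--             if cur > char:
--                 ans += 1
--             cur = char
--     return ans
-- ===== SOURCE B (Python) =====
-- def count_a_visits(S: str) -> int:
--     # Different decomposition: count the maximal strictly-increasing runs of S
--     # (outer loop = one run per iteration, inner loop skips the run), then apply
--     # a closed-form correction: answer = #runs - (1 if S[0] > 'A' else 0).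
--     n = len(S)
--     if n == 0:
--         return 0
--     runs = 0
--     i = 0
--     while i < n:
--         runs += 1
--         i += 1
--         while i < n and S[i - 1] < S[i]:
--             i += 1
--     return runs - (1 if S[0] > 'A' else 0)
-- ===== Notes on version B (the rewrite author's own statement) =====
-- stated objective: alternative
-- what changed: Replaces A's stateful per-character counter with a recursive count of the maximal strictly-increasing runs of S plus a closed-form correction (subtract 1 if the first character exceeds 'A').
import Mathlib
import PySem

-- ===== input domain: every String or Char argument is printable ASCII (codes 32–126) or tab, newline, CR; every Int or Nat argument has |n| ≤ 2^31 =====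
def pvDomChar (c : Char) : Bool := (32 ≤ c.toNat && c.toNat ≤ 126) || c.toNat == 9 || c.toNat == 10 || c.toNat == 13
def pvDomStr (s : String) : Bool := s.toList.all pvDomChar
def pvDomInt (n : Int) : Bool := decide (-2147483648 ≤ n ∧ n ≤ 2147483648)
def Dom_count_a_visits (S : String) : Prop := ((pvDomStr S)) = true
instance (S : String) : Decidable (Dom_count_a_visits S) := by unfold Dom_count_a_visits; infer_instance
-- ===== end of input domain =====

-- B counts the maximal strictly-increasing runs of S recursively and subtracts 1
-- when the first character exceeds 'A' (alternative decomposition; same O(n) cost).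
-- ===== PORT A =====
def count_a_visits (S : String) : Int :=
  (S.toList.foldl
    (fun (st : Char × Int) char =>
      if char = st.1 then (st.1, st.2 + 1)
      else (char, if st.1 > char then st.2 + 1 else st.2))
    ('A', 0)).2

-- ===== PORT B =====
-- number of maximal strictly increasing runs of c :: rest
def pvRunsFrom (c : Char) : List Char → Int
  | [] => 1
  | d :: tail => if c < d then pvRunsFrom d tail else 1 + pvRunsFrom d tail

def count_a_visits_alt (S : String) : Int :=
  match S.toList with
  | [] => 0
  | c :: rest => pvRunsFrom c rest - (if 'A' < c then 1 else 0)

-- ===== PRECONDITION & SPEC =====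
def Spec_count_a_visits (S : String) (out : Int) : Prop := out = count_a_visits_alt S
instance (S : String) (out : Int) : Decidable (Spec_count_a_visits S out) := by unfold Spec_count_a_visits; infer_instance

-- ===== CLAIM =====
def Claim_equal_count_a_visits : Prop := ∀ (S : String), Dom_count_a_visits S → Spec_count_a_visits S (count_a_visits S)

-- ===== LEMMAS AND PROOFS =====
-- A's loop computes ans plus the number of adjacent pairs with p.2 ≤ p.1
theorem pv_loop (l : List Char) (cur : Char) (ans : Int) :
    (l.foldl
      (fun (st : Char × Int) char =>
        if char = st.1 then (st.1, st.2 + 1)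
        else (char, if st.1 > char then st.2 + 1 else st.2))
      (cur, ans)).2
    = ans + (((cur :: l).zip l).filter (fun p => decide (p.2 ≤ p.1))).length := by
  induction l generalizing cur ans with
  | nil => simp
  | cons c rest ih =>
    simp only [List.foldl_cons, List.zip_cons_cons, List.filter_cons]
    by_cases h : c = cur
    · subst h
      rw [ih]
      simp only [le_refl, decide_true]
      push_cast [List.length_cons]; ring
    · simp only [if_neg h, ih]
      by_cases hlt : cur > c
      · have : (decide (c ≤ cur)) = true := by simp [le_of_lt hlt]
        rw [if_pos hlt, this]
        simp only [if_true]
        push_cast [List.length_cons]; ring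
      · have : (decide (c ≤ cur)) = false := by
          simp only [decide_eq_false_iff_not]
          intro hle
          exact hlt (lt_of_le_of_ne hle h)
        simp [if_neg hlt, this]

-- run count = (#adjacent non-increasing pairs) + 1
theorem pv_runs (l : List Char) (c : Char) :
    pvRunsFrom c l
      = (((c :: l).zip l).filter (fun p => decide (p.2 ≤ p.1))).length + 1 := by
  induction l generalizing c with
  | nil => simp [pvRunsFrom]
  | cons d tail ih =>
    simp only [pvRunsFrom, List.zip_cons_cons, List.filter_cons, ih]
    by_cases h : c < d
    · have : (decide (d ≤ c)) = false := by simp [not_le.mpr h]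
      rw [if_pos h, this]
      simp
    · have : (decide (d ≤ c)) = true := by simp [not_lt.mp h]
      rw [if_neg h, this]
      simp only [if_true]
      push_cast [List.length_cons]; ring

-- ===== VERDICT =====
theorem count_a_visits_spec : Claim_equal_count_a_visits := by
  intro S _
  unfold Spec_count_a_visits count_a_visits count_a_visits_alt
  rw [pv_loop]
  cases hl : S.toList with
  | nil => simp
  | cons c rest =>
    simp only [List.zip_cons_cons, List.filter_cons, pv_runs, Int.zero_add]
    by_cases h : 'A' < c
    · have : (decide (c ≤ 'A')) = false := by simp [not_le.mpr h]
      rw [this, if_pos h]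
      simp
    · have : (decide (c ≤ 'A')) = true := by simp [not_lt.mp h]
      rw [this, if_neg h]
      simp only [if_true]
      push_cast [List.length_cons]; ring
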